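-- pv_equiv track=rewrite | github.com/u24ai049/AI-lab- | Assignment 7/que 1.py | get_best_neighbor
-- ===== SOURCE A (Python) =====
-- def heuristic(board):
--     attacks = 0
--     n = len(board)
--     for i in range(n):
--         for j in range(i+1, n):
--             if board[i] == board[j]:
--                 attacks += 1
--             if abs(board[i] - board[j]) == abs(i - j):
--                 attacks += 1
--     return attacks
--
-- def get_best_neighbor(board):
--     best_h = heuristic(board)
--     best_board = board[:]
--     for col in range(8):
--         for row in range(8):
--             if row == board[col]:
--                 continue
--             neighbor = board[:]
--             neighbor[col] = row
--             h = heuristic(neighbor)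
--             if h < best_h:
--                 best_h = h
--                 best_board = neighbor[:]
--     return best_board, best_h
-- ===== SOURCE B (Python) =====
-- def heuristic(board):
--     rows = {}
--     d1 = {}
--     d2 = {}
--     attacks = 0
--     for i, v in enumerate(board):
--         attacks += rows.get(v, 0) + d1.get(v - i, 0) + d2.get(v + i, 0)
--         rows[v] = rows.get(v, 0) + 1
--         d1[v - i] = d1.get(v - i, 0) + 1
--         d2[v + i] = d2.get(v + i, 0) + 1
--     return attacks
--
-- def get_best_neighbor(board):
--     best_h = heuristic(board)
--     best_board = board[:]
--     for col in range(8):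
--         for row in range(8):
--             if row == board[col]:
--                 continue
--             neighbor = board[:]
--             neighbor[col] = row
--             h = heuristic(neighbor)
--             if h < best_h:
--                 best_h = h
--                 best_board = neighbor[:]
--     return best_board, best_h
-- ===== Notes on version B (the rewrite author's own statement) =====
-- stated objective: faster
-- what changed: heuristic is rewritten from a nested O(n^2) pairwise scan to one pass with three frequency dictionaries (row, value-index, value+index), counting earlier conflicting queens as each queen is visited; the neighbor scan keeps A's column-major strict-< tie-breaking.
import Mathlib
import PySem

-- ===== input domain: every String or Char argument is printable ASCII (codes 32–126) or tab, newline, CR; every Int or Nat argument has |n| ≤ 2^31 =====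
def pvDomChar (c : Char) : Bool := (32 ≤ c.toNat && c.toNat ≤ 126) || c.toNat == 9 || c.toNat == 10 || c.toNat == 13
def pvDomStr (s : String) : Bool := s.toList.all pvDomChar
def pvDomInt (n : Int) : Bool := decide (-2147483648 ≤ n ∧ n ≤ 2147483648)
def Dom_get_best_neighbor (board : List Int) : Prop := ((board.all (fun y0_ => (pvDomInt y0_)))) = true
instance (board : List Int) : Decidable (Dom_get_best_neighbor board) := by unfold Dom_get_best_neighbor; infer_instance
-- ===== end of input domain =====

-- B replaces the O(n^2) pairwise heuristic by a one-pass heuristic with three frequency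
-- dictionaries (asymptotically faster); the neighbor scan keeps A's order and tie-breaking.

-- ===== PORT A =====
-- heuristic(board): nested pairwise loops
def pvHeurA (board : List Int) : Int :=
  let n : Int := PySem.List.len board
  (PySem.List.pyRange 0 n 1).foldl (fun attacks i =>
    (PySem.List.pyRange (i + 1) n 1).foldl (fun attacks j =>
      let a1 := if PySem.List.pyGetD board i 0 = PySem.List.pyGetD board j 0
                then attacks + 1 else attacks
      if |PySem.List.pyGetD board i 0 - PySem.List.pyGetD board j 0| = |i - j|
      then a1 + 1 else a1) attacks) 0

def get_best_neighbor (board : List Int) : List Int × Int :=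
  (PySem.List.pyRange 0 8 1).foldl (fun (best : List Int × Int) col =>
    (PySem.List.pyRange 0 8 1).foldl (fun best row =>
      if row = PySem.List.pyGetD board col 0 then best
      else
        let neighbor := PySem.List.pySetD board col row
        let h := pvHeurA neighbor
        if h < best.2 then (neighbor, h) else best) best)
    (board, pvHeurA board)

-- ===== PORT B =====
-- heuristic(board): one pass over enumerate(board) with three counting dicts
def pvHeurB (board : List Int) : Int :=
  ((PySem.List.enumerate board 0).foldl
    (fun (st : PySem.Dict Int Int × PySem.Dict Int Int × PySem.Dict Int Int × Int) p =>
      let rows := st.1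
      let d1 := st.2.1
      let d2 := st.2.2.1
      let attacks := st.2.2.2 + rows.getD p.2 0 + d1.getD (p.2 - p.1) 0 + d2.getD (p.2 + p.1) 0
      (rows.insert p.2 (rows.getD p.2 0 + 1),
       d1.insert (p.2 - p.1) (d1.getD (p.2 - p.1) 0 + 1),
       d2.insert (p.2 + p.1) (d2.getD (p.2 + p.1) 0 + 1),
       attacks))
    (PySem.Dict.empty, PySem.Dict.empty, PySem.Dict.empty, 0)).2.2.2

def get_best_neighbor_alt (board : List Int) : List Int × Int :=
  (PySem.List.pyRange 0 8 1).foldl (fun (best : List Int × Int) col =>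
    (PySem.List.pyRange 0 8 1).foldl (fun best row =>
      if row = PySem.List.pyGetD board col 0 then best
      else
        let neighbor := PySem.List.pySetD board col row
        let h := pvHeurB neighbor
        if h < best.2 then (neighbor, h) else best) best)
    (board, pvHeurB board)

-- ===== PRECONDITION & SPEC =====
-- Pre_ excludes boards shorter than 8, on which the Python A (and B) raises IndexError at board[col].
def Pre_get_best_neighbor (board : List Int) : Prop := 8 ≤ board.length
instance (board : List Int) : Decidable (Pre_get_best_neighbor board) := by
  unfold Pre_get_best_neighbor; infer_instance

def pvWitness_get_best_neighbor : List Int := [0, 1, 2, 3, 4, 5, 6, 7]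

def Spec_get_best_neighbor (board : List Int) (out : List Int × Int) : Prop := out = get_best_neighbor_alt board
instance (board : List Int) (out : List Int × Int) : Decidable (Spec_get_best_neighbor board out) := by unfold Spec_get_best_neighbor; infer_instance

-- ===== CLAIM (what is proved, stated in full; the proofs are below) =====
def Claim_equal_get_best_neighbor : Prop := ∀ (board : List Int), Dom_get_best_neighbor board → Pre_get_best_neighbor board → Spec_get_best_neighbor board (get_best_neighbor board)

-- ===== LEMMAS AND PROOFS =====

-- pairwise contribution with the first queen at the smaller index
def pvG (a b : Int × Int) : Int :=
  (if a.2 = b.2 then 1 else 0) + (if |a.2 - b.2| = |a.1 - b.1| then 1 else 0)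

-- total attack count of an enumerated board, grouped by the first index
def pvPA : List (Int × Int) → Int
  | [] => 0
  | a :: rest => (rest.map (pvG a)).sum + pvPA rest

-- B's per-queen contribution against the already-seen prefix p
def pvCross (p : List (Int × Int)) (a : Int × Int) : Int :=
  ((p.map (·.2)).count a.2 : Int) +
  ((p.map (fun q => q.2 - q.1)).count (a.2 - a.1) : Int) +
  ((p.map (fun q => q.2 + q.1)).count (a.2 + a.1) : Int)

def pvCrossAll (p e : List (Int × Int)) : Int :=
  match e with
  | [] => 0
  | a :: e => pvCross p a + pvCrossAll (p ++ [a]) e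

theorem pvCrossAll_cons (p : List (Int × Int)) (a : Int × Int) (e : List (Int × Int)) :
    pvCrossAll p (a :: e) = pvCross p a + pvCrossAll (p ++ [a]) e := rfl

theorem pvPA_cons (a : Int × Int) (rest : List (Int × Int)) :
    pvPA (a :: rest) = (rest.map (pvG a)).sum + pvPA rest := rfl

theorem pvCross_eq_sum (p : List (Int × Int)) (a : Int × Int)
    (h : ∀ b ∈ p, b.1 ≠ a.1) :
    pvCross p a = (p.map (fun b => pvG b a)).sum := by
  induction p with
  | nil => simp [pvCross]
  | cons b p ih =>
    have hb : b.1 ≠ a.1 := h b (by simp)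
    have ih' := ih (fun c hc => h c (by simp [hc]))
    unfold pvCross at ih' ⊢
    simp only [List.map_cons, List.count_cons, List.sum_cons, beq_iff_eq]
    push_cast
    have habs : (|b.2 - a.2| = |b.1 - a.1|) ↔
        ((b.2 - b.1 = a.2 - a.1) ∨ (b.2 + b.1 = a.2 + a.1)) := by
      rw [Int.abs_eq_natAbs, Int.abs_eq_natAbs, Int.natCast_inj]
      omega
    have key : ((if b.2 = a.2 then (1:Int) else 0) + (if b.2 - b.1 = a.2 - a.1 then 1 else 0)
        + (if b.2 + b.1 = a.2 + a.1 then 1 else 0)) = pvG b a := by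
      unfold pvG
      by_cases h1 : b.2 = a.2
      · have hd1 : ¬ (b.2 - b.1 = a.2 - a.1) := by omega
        have hd2 : ¬ (b.2 + b.1 = a.2 + a.1) := by omega
        have hno : ¬ (|b.2 - a.2| = |b.1 - a.1|) := by rw [habs]; omega
        rw [if_pos h1, if_neg hd1, if_neg hd2, if_neg hno]
        norm_num
      · by_cases hd1 : b.2 - b.1 = a.2 - a.1
        · have hd2 : ¬ (b.2 + b.1 = a.2 + a.1) := by omega
          have hyes : |b.2 - a.2| = |b.1 - a.1| := habs.mpr (Or.inl hd1)
          rw [if_neg h1, if_pos hd1, if_neg hd2, if_pos hyes]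
          norm_num
        · by_cases hd2 : b.2 + b.1 = a.2 + a.1
          · have hyes : |b.2 - a.2| = |b.1 - a.1| := habs.mpr (Or.inr hd2)
            rw [if_neg h1, if_neg hd1, if_pos hd2, if_pos hyes]
            norm_num
          · have hno : ¬ (|b.2 - a.2| = |b.1 - a.1|) := by rw [habs]; omega
            rw [if_neg h1, if_neg hd1, if_neg hd2, if_neg hno]
            norm_num
    rw [← ih', ← key]
    ring

theorem pvCrossAll_eq (e p : List (Int × Int))
    (h : (p ++ e).Pairwise (fun x y => x.1 < y.1)) :
    pvCrossAll p e = (e.map (fun a => (p.map (fun b => pvG b a)).sum)).sum + pvPA e := by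
  induction e generalizing p with
  | nil => simp [pvCrossAll, pvPA]
  | cons a e ih =>
    have h' : ((p ++ [a]) ++ e).Pairwise (fun x y => x.1 < y.1) := by
      rw [List.append_assoc]; exact h
    have hdist : ∀ b ∈ p, b.1 ≠ a.1 := by
      intro b hb
      have := (List.pairwise_append.mp h).2.2 b hb a (by simp)
      omega
    rw [pvCrossAll_cons, pvCross_eq_sum p a hdist, ih (p ++ [a]) h', pvPA_cons, List.map_cons, List.sum_cons]
    have hmap : e.map (fun c => ((p ++ [a]).map (fun b => pvG b c)).sum)
        = e.map (fun c => (p.map (fun b => pvG b c)).sum + pvG a c) := by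
      apply List.map_congr_left
      intro c _
      simp
    rw [hmap, PySem.List.sum_map_add_int]
    ring

-- ===== A-side: pvHeurA equals pvPA of the enumerated board =====

theorem pvMap_pyRange_enumerate (xs : List Int) (k : Nat) :
    (PySem.List.pyRange (k : Int) (xs.length : Int) 1).map
        (fun j => (j, PySem.List.pyGetD xs j 0))
      = PySem.List.enumerate (xs.drop k) (k : Int) := by
  by_cases hk : k < xs.length
  · have hdrop : xs.drop k = xs[k] :: xs.drop (k + 1) := List.drop_eq_getElem_cons hk
    rw [PySem.List.pyRange_one_cons (by exact_mod_cast hk), List.map_cons, hdrop,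
        PySem.List.enumerate_cons]
    have h1 : PySem.List.pyGetD xs (k : Int) 0 = xs[k] := by
      rw [PySem.List.pyGetD_natCast, List.getD_eq_getElem?_getD,
          List.getElem?_eq_getElem hk, Option.getD_some]
    have h2 : ((k : Int) + 1) = ((k + 1 : Nat) : Int) := by push_cast; ring
    rw [h1, h2, pvMap_pyRange_enumerate xs (k + 1)]
  · rw [PySem.List.pyRange_one_eq_nil (by exact_mod_cast Nat.le_of_not_lt hk)]
    rw [List.drop_eq_nil_of_le (Nat.le_of_not_lt hk)]
    simp [PySem.List.enumerate]
termination_by xs.length - k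

-- the inner loop body of A adds pvG of the two enumerated queens
theorem pvInner_body (xs : List Int) (i : Int) (attacks j : Int) :
    (let a1 := if PySem.List.pyGetD xs i 0 = PySem.List.pyGetD xs j 0
               then attacks + 1 else attacks
     if |PySem.List.pyGetD xs i 0 - PySem.List.pyGetD xs j 0| = |i - j|
     then a1 + 1 else a1)
    = attacks + pvG (i, PySem.List.pyGetD xs i 0) (j, PySem.List.pyGetD xs j 0) := by
  unfold pvG
  dsimp only
  split_ifs <;> ring

theorem pvFoldl_add_int {α : Type} (f : α → Int) (l : List α) (init : Int) :
    l.foldl (fun acc x => acc + f x) init = init + (l.map f).sum := by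
  induction l generalizing init with
  | nil => simp
  | cons x l ih => simp [List.foldl_cons, ih]; ring

theorem pvHeurA_sum (xs : List Int) (k : Nat) :
    (PySem.List.pyRange (k : Int) (xs.length : Int) 1).foldl (fun attacks i =>
      (PySem.List.pyRange (i + 1) (xs.length : Int) 1).foldl (fun attacks j =>
        let a1 := if PySem.List.pyGetD xs i 0 = PySem.List.pyGetD xs j 0
                  then attacks + 1 else attacks
        if |PySem.List.pyGetD xs i 0 - PySem.List.pyGetD xs j 0| = |i - j|
        then a1 + 1 else a1) attacks) 0
    = pvPA (PySem.List.enumerate (xs.drop k) (k : Int)) := by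
  by_cases hk : k < xs.length
  · rw [PySem.List.pyRange_one_cons (by exact_mod_cast hk), List.foldl_cons]
    have hinner : ∀ init : Int,
        (PySem.List.pyRange ((k : Int) + 1) (xs.length : Int) 1).foldl (fun attacks j =>
          let a1 := if PySem.List.pyGetD xs (k : Int) 0 = PySem.List.pyGetD xs j 0
                    then attacks + 1 else attacks
          if |PySem.List.pyGetD xs (k : Int) 0 - PySem.List.pyGetD xs j 0| = |(k : Int) - j|
          then a1 + 1 else a1) init
        = init + ((PySem.List.enumerate (xs.drop (k + 1)) ((k + 1 : Nat) : Int)).map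
            (pvG ((k : Int), PySem.List.pyGetD xs (k : Int) 0))).sum := by
      intro init
      have hb : (PySem.List.pyRange ((k : Int) + 1) (xs.length : Int) 1).foldl (fun attacks j =>
          let a1 := if PySem.List.pyGetD xs (k : Int) 0 = PySem.List.pyGetD xs j 0
                    then attacks + 1 else attacks
          if |PySem.List.pyGetD xs (k : Int) 0 - PySem.List.pyGetD xs j 0| = |(k : Int) - j|
          then a1 + 1 else a1) init
        = (PySem.List.pyRange ((k : Int) + 1) (xs.length : Int) 1).foldl (fun attacks j =>
            attacks + pvG ((k : Int), PySem.List.pyGetD xs (k : Int) 0)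
              (j, PySem.List.pyGetD xs j 0)) init := by
        apply PySem.List.foldl_congr_mem
        intro acc x _
        exact pvInner_body xs (k : Int) acc x
      rw [hb, pvFoldl_add_int]
      have h2 : ((k : Int) + 1) = ((k + 1 : Nat) : Int) := by push_cast; ring
      rw [h2, ← pvMap_pyRange_enumerate xs (k + 1), List.map_map]
      rfl
    rw [hinner]
    have h2 : ((k : Int) + 1) = ((k + 1 : Nat) : Int) := by push_cast; ring
    rw [h2]
    -- outer fold with a nonzero init: pull the init out
    have hpull : ∀ (l : List Int) (g : Int → Int → Int)
        (hg : ∀ init i, g init i = init + g 0 i) (init : Int),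
        l.foldl (fun acc i => g acc i) init = init + l.foldl (fun acc i => g acc i) 0 := by
      intro l g hg
      induction l with
      | nil => intro init; simp
      | cons x l ihl =>
        intro init
        simp only [List.foldl_cons]
        rw [hg init x, ihl (init + g 0 x), ihl (g 0 x)]
        ring
    have hg : ∀ (init i : Int),
        (PySem.List.pyRange (i + 1) (xs.length : Int) 1).foldl (fun attacks j =>
          let a1 := if PySem.List.pyGetD xs i 0 = PySem.List.pyGetD xs j 0
                    then attacks + 1 else attacks
          if |PySem.List.pyGetD xs i 0 - PySem.List.pyGetD xs j 0| = |i - j|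
          then a1 + 1 else a1) init
        = init + (PySem.List.pyRange (i + 1) (xs.length : Int) 1).foldl (fun attacks j =>
          let a1 := if PySem.List.pyGetD xs i 0 = PySem.List.pyGetD xs j 0
                    then attacks + 1 else attacks
          if |PySem.List.pyGetD xs i 0 - PySem.List.pyGetD xs j 0| = |i - j|
          then a1 + 1 else a1) 0 := by
      intro init i
      have hb : ∀ init : Int, (PySem.List.pyRange (i + 1) (xs.length : Int) 1).foldl (fun attacks j =>
          let a1 := if PySem.List.pyGetD xs i 0 = PySem.List.pyGetD xs j 0
                    then attacks + 1 else attacks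
          if |PySem.List.pyGetD xs i 0 - PySem.List.pyGetD xs j 0| = |i - j|
          then a1 + 1 else a1) init
        = (PySem.List.pyRange (i + 1) (xs.length : Int) 1).foldl (fun attacks j =>
            attacks + pvG (i, PySem.List.pyGetD xs i 0) (j, PySem.List.pyGetD xs j 0)) init := by
        intro init
        apply PySem.List.foldl_congr_mem
        intro acc x _
        exact pvInner_body xs i acc x
      rw [hb, hb, pvFoldl_add_int, pvFoldl_add_int]
      ring
    rw [hpull _ _ hg, pvHeurA_sum xs (k + 1)]
    -- now assemble pvPA of the cons
    have hdropk : PySem.List.enumerate (xs.drop k) (k : Int)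
        = ((k : Int), PySem.List.pyGetD xs (k : Int) 0)
          :: PySem.List.enumerate (xs.drop (k + 1)) ((k + 1 : Nat) : Int) := by
      rw [← pvMap_pyRange_enumerate xs k, ← pvMap_pyRange_enumerate xs (k + 1), ← h2,
          PySem.List.pyRange_one_cons (by exact_mod_cast hk), List.map_cons]
    rw [hdropk, pvPA_cons]
    ring
  · rw [PySem.List.pyRange_one_eq_nil (by exact_mod_cast Nat.le_of_not_lt hk)]
    rw [List.drop_eq_nil_of_le (Nat.le_of_not_lt hk)]
    simp [PySem.List.enumerate, pvPA]
termination_by xs.length - k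

theorem pvHeurA_eq_PA (xs : List Int) :
    pvHeurA xs = pvPA (PySem.List.enumerate xs 0) := by
  have := pvHeurA_sum xs 0
  simp only [Nat.cast_zero, List.drop_zero] at this
  unfold pvHeurA
  simp only [PySem.List.len_eq]
  exact this

-- ===== B-side: the dict loop computes pvCrossAll =====

theorem pvLoopB_spec (e : List (Int × Int)) (p : List (Int × Int)) (acc : Int) :
    (e.foldl
      (fun (st : PySem.Dict Int Int × PySem.Dict Int Int × PySem.Dict Int Int × Int) q =>
        let rows := st.1
        let d1 := st.2.1
        let d2 := st.2.2.1
        let attacks := st.2.2.2 + rows.getD q.2 0 + d1.getD (q.2 - q.1) 0 + d2.getD (q.2 + q.1) 0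
        (rows.insert q.2 (rows.getD q.2 0 + 1),
         d1.insert (q.2 - q.1) (d1.getD (q.2 - q.1) 0 + 1),
         d2.insert (q.2 + q.1) (d2.getD (q.2 + q.1) 0 + 1),
         attacks))
      (PySem.Dict.counter (p.map (·.2)),
       PySem.Dict.counter (p.map (fun q => q.2 - q.1)),
       PySem.Dict.counter (p.map (fun q => q.2 + q.1)), acc)).2.2.2
    = acc + pvCrossAll p e := by
  induction e generalizing p acc with
  | nil => simp [pvCrossAll]
  | cons a e ih =>
    simp only [List.foldl_cons]
    have hc : ∀ (ks : List Int) (v : Int),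
        (PySem.Dict.counter ks).insert v ((PySem.Dict.counter ks).getD v 0 + 1)
          = PySem.Dict.counter (ks ++ [v]) := by
      intro ks v
      rw [← PySem.Dict.foldl_insert_getD_add_one_eq_counter,
          ← PySem.Dict.foldl_insert_getD_add_one_eq_counter, List.foldl_append]
      simp
    have h2 : p.map (·.2) ++ [a.2] = (p ++ [a]).map (·.2) := by simp
    have hm : p.map (fun q => q.2 - q.1) ++ [a.2 - a.1] = (p ++ [a]).map (fun q => q.2 - q.1) := by simp
    have hp : p.map (fun q => q.2 + q.1) ++ [a.2 + a.1] = (p ++ [a]).map (fun q => q.2 + q.1) := by simp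
    rw [hc, hc, hc, h2, hm, hp, ih, pvCrossAll_cons]
    simp only [pvCross, PySem.Dict.getD_counter]
    ring

theorem pvHeurB_eq_crossAll (xs : List Int) :
    pvHeurB xs = pvCrossAll [] (PySem.List.enumerate xs 0) := by
  unfold pvHeurB
  have := pvLoopB_spec (PySem.List.enumerate xs 0) [] 0
  simp only [List.map_nil] at this
  rw [show (PySem.Dict.counter ([] : List Int)) = PySem.Dict.empty from rfl] at this
  simpa using this

theorem pvHeur_eq (xs : List Int) : pvHeurA xs = pvHeurB xs := by
  rw [pvHeurA_eq_PA, pvHeurB_eq_crossAll]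
  rw [pvCrossAll_eq (PySem.List.enumerate xs 0) []
    (by simpa using PySem.List.pairwise_lt_enumerate xs 0)]
  simp

theorem pvHeur_funext : pvHeurA = pvHeurB := funext pvHeur_eq

-- ===== VERDICT (by name: the statement is the Claim_ definition above) =====
theorem get_best_neighbor_spec : Claim_equal_get_best_neighbor := by
  intro board _ _
  unfold Spec_get_best_neighbor get_best_neighbor get_best_neighbor_alt
  rw [pvHeur_funext]
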